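-- pv_equiv track=rewrite | github.com/Frosselet/pdf-ocr | src/pdf_ocr/heuristics.py | build_column_names_from_headers
-- ===== SOURCE A (Python) =====
-- def build_column_names_from_headers(header_rows: list[list[str]]) -> list[str]:
--     """Build column names by stacking header rows vertically.
--
--     For multi-row headers, concatenates values from each row with spaces.
--     Deduplicates consecutive identical words.
--     """
--     if not header_rows:
--         return []
--
--     num_cols = max(len(row) for row in header_rows)
--     col_fragments: list[list[str]] = [[] for _ in range(num_cols)]
--
--     for row in header_rows:
--         for ci, cell in enumerate(row):
--             if ci < num_cols:
--                 text = cell.strip() if isinstance(cell, str) else str(cell).strip()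
--                 if text:
--                     col_fragments[ci].append(text)
--
--     # Build final column names with deduplication
--     column_names = []
--     for fragments in col_fragments:
--         deduped_words: list[str] = []
--         for fragment in fragments:
--             for word in fragment.split():
--                 if not deduped_words or word != deduped_words[-1]:
--                     deduped_words.append(word)
--         column_names.append(" ".join(deduped_words))
--
--     return column_names
-- ===== SOURCE B (Python) =====
-- def build_column_names_from_headers(header_rows: list[list[str]]) -> list[str]:
--     """Column-major single pass: no transpose buffer, no per-column word list.
--
--     For each column index, walk the header rows in order, strip/split each cell
--     and fold the words directly into a string accumulator, skipping a word equal
--     to the previously kept one.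
--     """
--     if not header_rows:
--         return []
--
--     num_cols = max(len(row) for row in header_rows)
--     column_names = []
--     for ci in range(num_cols):
--         name = ""
--         prev = None
--         for row in header_rows:
--             if ci < len(row):
--                 cell = row[ci]
--                 text = cell.strip() if isinstance(cell, str) else str(cell).strip()
--                 for word in text.split():
--                     if word != prev:
--                         name = word if prev is None else name + " " + word
--                         prev = word
--         column_names.append(name)
--     return column_names
-- ===== Notes on version B (the rewrite author's own statement) =====
-- stated objective: simpler
-- what changed: Replaces A's row-major fill of a per-column transpose buffer (col_fragments) plus a second dedup/join pass with a single column-major pass that folds each column's words directly into a string accumulator with a prev-word variable.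
import Mathlib
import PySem

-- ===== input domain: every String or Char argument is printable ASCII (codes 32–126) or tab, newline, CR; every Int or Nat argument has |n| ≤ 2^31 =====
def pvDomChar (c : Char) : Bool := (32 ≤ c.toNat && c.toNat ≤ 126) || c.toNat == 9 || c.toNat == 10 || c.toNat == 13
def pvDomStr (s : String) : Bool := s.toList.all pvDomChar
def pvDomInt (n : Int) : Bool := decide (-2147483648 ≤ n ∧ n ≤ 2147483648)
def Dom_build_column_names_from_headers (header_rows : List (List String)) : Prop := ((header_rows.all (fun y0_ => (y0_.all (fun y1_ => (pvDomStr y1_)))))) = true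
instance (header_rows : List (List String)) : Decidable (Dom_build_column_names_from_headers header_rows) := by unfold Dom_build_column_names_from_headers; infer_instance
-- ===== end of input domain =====

-- B replaces A's row-major fill of a transpose buffer (col_fragments) plus a second
-- dedup-and-join pass by one column-major pass folding each column's words directly
-- into a string accumulator (objective: simpler).

-- ===== PORT A =====
-- max(len(row) for row in header_rows)
def pvMaxLenA (header_rows : List (List String)) : Nat :=
  (header_rows.map List.length).foldl Nat.max 0

-- 'if not deduped_words or word != deduped_words[-1]: deduped_words.append(word)'
def pvADedup (deduped : List String) (word : String) : List String :=
  match deduped.getLast? with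
  | none => deduped ++ [word]
  | some last => if word ≠ last then deduped ++ [word] else deduped

-- inner 'for fragment in fragments: for word in fragment.split(): …'
def pvAFragStep (d : List String) (frag : String) : List String :=
  (PySem.Str.split₀ frag).foldl pvADedup d

-- 'for ci, cell in enumerate(row): …' — structural recursion carrying the running index ci
def pvAProcRow (numCols ci : Nat) (row : List String) (buf : List (List String)) :
    List (List String) :=
  match row with
  | [] => buf
  | cell :: rest =>
    pvAProcRow numCols (ci + 1) rest
      (if ci < numCols then
        (if PySem.Str.strip cell ≠ "" then
          buf.set ci (buf.getD ci [] ++ [PySem.Str.strip cell])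
        else buf)
      else buf)

def build_column_names_from_headers (header_rows : List (List String)) : List String :=
  match header_rows with
  | [] => []
  | _ :: _ =>
    ((header_rows.foldl (fun buf row => pvAProcRow (pvMaxLenA header_rows) 0 row buf)
        (List.replicate (pvMaxLenA header_rows) [])).foldl
      (fun names fragments =>
        names ++ [PySem.Str.join " " (fragments.foldl pvAFragStep [])]) [])

-- ===== PORT B =====
def pvMaxLenB (header_rows : List (List String)) : Nat :=
  (header_rows.map List.length).foldl Nat.max 0

-- 'if word != prev: name = word if prev is None else name + " " + word; prev = word'
def pvBWordStep (st : String × Option String) (word : String) : String × Option String :=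
  if st.2 ≠ some word then
    ((match st.2 with
      | none => word
      | some _ => st.1 ++ " " ++ word), some word)
  else st

-- one header row for column ci: 'if ci < len(row): … for word in text.split(): …'
def pvBRowStep (ci : Nat) (st : String × Option String) (row : List String) :
    String × Option String :=
  if ci < row.length then
    (PySem.Str.split₀ (PySem.Str.strip (row.getD ci ""))).foldl pvBWordStep st
  else st

def pvBColName (header_rows : List (List String)) (ci : Nat) : String :=
  (header_rows.foldl (pvBRowStep ci) ("", none)).1

def build_column_names_from_headers_alt (header_rows : List (List String)) : List String :=
  match header_rows with
  | [] => []
  | _ :: _ =>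
    (List.range (pvMaxLenB header_rows)).foldl
      (fun names ci => names ++ [pvBColName header_rows ci]) []

-- ===== PRECONDITION & SPEC =====
def Spec_build_column_names_from_headers (header_rows : List (List String)) (out : List String) : Prop := out = build_column_names_from_headers_alt header_rows
instance (header_rows : List (List String)) (out : List String) : Decidable (Spec_build_column_names_from_headers header_rows out) := by unfold Spec_build_column_names_from_headers; infer_instance

-- ===== CLAIM (what is proved, stated in full; the proofs are below) =====
def Claim_equal_build_column_names_from_headers : Prop := ∀ (header_rows : List (List String)), Dom_build_column_names_from_headers header_rows → Spec_build_column_names_from_headers header_rows (build_column_names_from_headers header_rows)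

-- ===== LEMMAS AND PROOFS =====

-- the fragments A's row loop contributes to column j, reading row from index ci on
def pvRowFrag (numCols ci : Nat) (row : List String) (j : Nat) : List String :=
  match row with
  | [] => []
  | cell :: rest =>
    (if j = ci ∧ ci < numCols ∧ PySem.Str.strip cell ≠ ""
     then [PySem.Str.strip cell] else [])
      ++ pvRowFrag numCols (ci + 1) rest j

def pvColFrags (numCols : Nat) (rows : List (List String)) (j : Nat) : List String :=
  rows.flatMap (fun row => pvRowFrag numCols 0 row j)

lemma pvGetD_set (buf : List (List String)) (ci j : Nat) (v : List String)
    (h : ci < buf.length) :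
    (buf.set ci v).getD j [] = if j = ci then v else buf.getD j [] := by
  by_cases hj : j = ci
  · subst hj; simp [List.getD_eq_getElem?_getD, h]
  · simp [List.getD_eq_getElem?_getD, List.getElem?_set_ne (by omega : ci ≠ j), hj]

lemma pvAProcRow_length (n : Nat) : ∀ (row : List String) (ci : Nat) (buf : List (List String)),
    (pvAProcRow n ci row buf).length = buf.length := by
  intro row
  induction row with
  | nil => intro ci buf; simp [pvAProcRow]
  | cons cell rest ih =>
    intro ci buf
    simp only [pvAProcRow]
    rw [ih]
    split_ifs <;> simp

lemma pvAProcRow_getD (n : Nat) : ∀ (row : List String) (ci : Nat) (buf : List (List String))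
    (j : Nat), buf.length = n →
    (pvAProcRow n ci row buf).getD j [] = buf.getD j [] ++ pvRowFrag n ci row j := by
  intro row
  induction row with
  | nil => intro ci buf j _; simp [pvAProcRow, pvRowFrag]
  | cons cell rest ih =>
    intro ci buf j hlen
    simp only [pvAProcRow, pvRowFrag]
    by_cases hci : ci < n
    · by_cases hs : PySem.Str.strip cell ≠ ""
      · rw [if_pos hci, if_pos hs, ih _ _ _ (by simp [hlen]),
          pvGetD_set _ _ _ _ (by omega)]
        by_cases hj : j = ci
        · subst hj; simp [hci, hs]
        · simp [hj]
      · rw [if_pos hci, if_neg hs, ih _ _ _ hlen]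
        simp only [ne_eq, not_not] at hs
        simp [hs]
    · rw [if_neg hci, ih _ _ _ hlen]
      simp [hci]

lemma pvAFold_length (n : Nat) : ∀ (rows : List (List String)) (buf : List (List String)),
    (rows.foldl (fun b r => pvAProcRow n 0 r b) buf).length = buf.length := by
  intro rows
  induction rows with
  | nil => intro buf; simp
  | cons r rest ih => intro buf; simp only [List.foldl_cons]; rw [ih, pvAProcRow_length]

lemma pvAFold_getD (n : Nat) : ∀ (rows : List (List String)) (buf : List (List String))
    (j : Nat), buf.length = n →
    (rows.foldl (fun b r => pvAProcRow n 0 r b) buf).getD j []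
      = buf.getD j [] ++ pvColFrags n rows j := by
  intro rows
  induction rows with
  | nil => intro buf j _; simp [pvColFrags]
  | cons r rest ih =>
    intro buf j hlen
    simp only [List.foldl_cons]
    rw [ih _ _ (by rw [pvAProcRow_length]; exact hlen), pvAProcRow_getD n r 0 buf j hlen]
    simp [pvColFrags, List.append_assoc]

lemma pvRowFrag_lt (n : Nat) : ∀ (row : List String) (ci j : Nat), j < ci →
    pvRowFrag n ci row j = [] := by
  intro row
  induction row with
  | nil => intro ci j _; simp [pvRowFrag]
  | cons cell rest ih =>
    intro ci j hj
    simp only [pvRowFrag]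
    rw [ih (ci + 1) j (by omega)]
    simp [show j ≠ ci by omega]

lemma pvRowFrag_add (n : Nat) : ∀ (row : List String) (ci k : Nat),
    pvRowFrag n ci row (ci + k) =
      (if k < row.length ∧ ci + k < n ∧ PySem.Str.strip (row.getD k "") ≠ ""
       then [PySem.Str.strip (row.getD k "")] else []) := by
  intro row
  induction row with
  | nil => intro ci k; simp [pvRowFrag]
  | cons cell rest ih =>
    intro ci k
    cases k with
    | zero =>
      simp only [pvRowFrag]
      rw [pvRowFrag_lt n rest (ci + 1) (ci + 0) (by omega)]
      simp
    | succ k' =>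
      simp only [pvRowFrag]
      rw [show ci + (k' + 1) = (ci + 1) + k' by omega, ih (ci + 1) k']
      simp only [show ¬ ((ci + 1) + k' = ci) by omega, false_and, if_false, List.nil_append]
      simp only [List.length_cons, List.getD_cons_succ]
      simp

lemma pvRowFrag_zero (n : Nat) (row : List String) (j : Nat) :
    pvRowFrag n 0 row j =
      (if j < row.length ∧ j < n ∧ PySem.Str.strip (row.getD j "") ≠ ""
       then [PySem.Str.strip (row.getD j "")] else []) := by
  simpa using pvRowFrag_add n row 0 j

lemma pvCharsJoin_concat (sp : List Char) : ∀ (d : List (List Char)) (w : List Char), d ≠ [] →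
    PySem.Chars.join sp (d ++ [w]) = PySem.Chars.join sp d ++ sp ++ w := by
  intro d
  induction d with
  | nil => intro w h; exact absurd rfl h
  | cons a t ih =>
    intro w _
    cases t with
    | nil => simp [PySem.Chars.join_cons_cons, PySem.Chars.join_singleton]
    | cons b t2 =>
      rw [show (a :: b :: t2) ++ [w] = a :: (b :: (t2 ++ [w])) from rfl,
        PySem.Chars.join_cons_cons,
        show (b :: (t2 ++ [w])) = (b :: t2) ++ [w] from rfl,
        ih w (by simp), PySem.Chars.join_cons_cons]
      simp [List.append_assoc]

lemma pvJoin_nil : PySem.Str.join " " [] = "" := by decide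

lemma pvJoin_singleton (w : String) : PySem.Str.join " " [w] = w := by
  simp [PySem.Str.join]

lemma pvJoin_concat (d : List String) (w : String) (hd : d ≠ []) :
    PySem.Str.join " " (d ++ [w]) = PySem.Str.join " " d ++ " " ++ w := by
  apply String.toList_inj.mp
  have h := pvCharsJoin_concat " ".toList (d.map String.toList) w.toList (by simpa using hd)
  simp only [PySem.Str.toList_join, List.map_append, List.map_cons, List.map_nil] at *
  simpa using h

lemma pvStep_rel (st : String × Option String) (d : List String) (w : String)
    (h1 : st.1 = PySem.Str.join " " d) (h2 : st.2 = d.getLast?) :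
    (pvBWordStep st w).1 = PySem.Str.join " " (pvADedup d w)
      ∧ (pvBWordStep st w).2 = (pvADedup d w).getLast? := by
  rcases hl : d.getLast? with _ | last
  · have hd : d = [] := List.getLast?_eq_none_iff.mp hl
    subst hd
    rw [pvJoin_nil] at h1
    simp only [List.getLast?_nil] at h2
    simp [pvBWordStep, pvADedup, h2, pvJoin_singleton]
  · have hd : d ≠ [] := by intro h; subst h; simp at hl
    by_cases hw : w = last
    · subst hw
      simp [pvBWordStep, pvADedup, hl, h2, h1]
    · have hne : st.2 ≠ some w := by
        rw [h2, hl]; simp; exact fun h => hw h.symm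
      have hA : pvADedup d w = d ++ [w] := by simp [pvADedup, hl, hw]
      have hB : pvBWordStep st w = (st.1 ++ " " ++ w, some w) := by
        unfold pvBWordStep
        rw [if_pos hne, h2, hl]
      rw [hA, hB]
      exact ⟨by rw [pvJoin_concat d w hd, h1], by simp⟩

lemma pvWords_rel : ∀ (ws : List String) (st : String × Option String) (d : List String),
    st.1 = PySem.Str.join " " d → st.2 = d.getLast? →
    (ws.foldl pvBWordStep st).1 = PySem.Str.join " " (ws.foldl pvADedup d)
      ∧ (ws.foldl pvBWordStep st).2 = (ws.foldl pvADedup d).getLast? := by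
  intro ws
  induction ws with
  | nil => intro st d h1 h2; exact ⟨h1, h2⟩
  | cons w rest ih =>
    intro st d h1 h2
    have h := pvStep_rel st d w h1 h2
    exact ih _ _ h.1 h.2

lemma pvSplit0_nil : PySem.Str.split₀ "" = [] := by decide

lemma pvRows_rel (n j : Nat) : ∀ (rows : List (List String)) (st : String × Option String)
    (d : List String), (∀ r ∈ rows, r.length ≤ n) →
    st.1 = PySem.Str.join " " d → st.2 = d.getLast? →
    (rows.foldl (pvBRowStep j) st).1
        = PySem.Str.join " " ((pvColFrags n rows j).foldl pvAFragStep d)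
      ∧ (rows.foldl (pvBRowStep j) st).2
        = ((pvColFrags n rows j).foldl pvAFragStep d).getLast? := by
  intro rows
  induction rows with
  | nil => intro st d _ h1 h2; exact ⟨h1, h2⟩
  | cons r rest ih =>
    intro st d hn h1 h2
    have hr : r.length ≤ n := hn r (by simp)
    have hcf : pvColFrags n (r :: rest) j
        = pvRowFrag n 0 r j ++ pvColFrags n rest j := by
      simp [pvColFrags]
    rw [hcf, List.foldl_append, List.foldl_cons]
    have key : (pvBRowStep j st r).1
          = PySem.Str.join " " ((pvRowFrag n 0 r j).foldl pvAFragStep d)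
        ∧ (pvBRowStep j st r).2
          = ((pvRowFrag n 0 r j).foldl pvAFragStep d).getLast? := by
      rw [pvRowFrag_zero]
      by_cases hjr : j < r.length
      · by_cases hs : PySem.Str.strip (r.getD j "") ≠ ""
        · rw [if_pos ⟨hjr, by omega, hs⟩]
          simp only [pvBRowStep, if_pos hjr, List.foldl_cons, List.foldl_nil, pvAFragStep]
          exact pvWords_rel _ st d h1 h2
        · rw [if_neg (by tauto)]
          simp only [ne_eq, not_not] at hs
          simp only [pvBRowStep, if_pos hjr, hs, pvSplit0_nil, List.foldl_nil]
          exact ⟨h1, h2⟩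
      · rw [if_neg (by tauto)]
        simp only [pvBRowStep, if_neg hjr, List.foldl_nil]
        exact ⟨h1, h2⟩
    exact ih _ _ (fun r' hr' => hn r' (by simp [hr'])) key.1 key.2

lemma pvCol_eq (rows : List (List String)) (n j : Nat) (hn : ∀ r ∈ rows, r.length ≤ n) :
    pvBColName rows j = PySem.Str.join " " ((pvColFrags n rows j).foldl pvAFragStep []) := by
  have h := pvRows_rel n j rows ("", none) [] hn (by rw [pvJoin_nil]) (by simp)
  exact h.1

lemma pvFoldlMax_le : ∀ (l : List Nat) (b : Nat), b ≤ l.foldl Nat.max b := by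
  intro l
  induction l with
  | nil => intro b; simp
  | cons x t ih => intro b; exact le_trans (Nat.le_max_left b x) (ih (Nat.max b x))

lemma pvMem_le_foldlMax : ∀ (l : List Nat) (b x : Nat), x ∈ l → x ≤ l.foldl Nat.max b := by
  intro l
  induction l with
  | nil => intro b x h; simp at h
  | cons y t ih =>
    intro b x h
    rcases List.mem_cons.mp h with h | h
    · subst h
      exact le_trans (Nat.le_max_right b x) (pvFoldlMax_le t (Nat.max b x))
    · exact ih _ x h

lemma pvMaxLen_spec (rows : List (List String)) : ∀ r ∈ rows, r.length ≤ pvMaxLenA rows :=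
  fun _ hr => pvMem_le_foldlMax _ 0 _ (List.mem_map_of_mem hr)

-- ===== VERDICT (by name: the statement is the Claim_ definition above) =====
theorem build_column_names_from_headers_spec : Claim_equal_build_column_names_from_headers := by
  intro rows _
  unfold Spec_build_column_names_from_headers
  cases rows with
  | nil => rfl
  | cons r0 rest =>
    simp only [build_column_names_from_headers, build_column_names_from_headers_alt]
    rw [PySem.List.foldl_append_singleton_eq_map, PySem.List.foldl_append_singleton_eq_map]
    have hlen : ((r0 :: rest).foldl
        (fun buf row => pvAProcRow (pvMaxLenA (r0 :: rest)) 0 row buf)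
        (List.replicate (pvMaxLenA (r0 :: rest)) [])).length
        = pvMaxLenA (r0 :: rest) := by
      rw [pvAFold_length]; simp
    have hmaxB : pvMaxLenB (r0 :: rest) = pvMaxLenA (r0 :: rest) := rfl
    rw [hmaxB]
    simp only [List.nil_append]
    apply List.ext_getElem
    · simp only [List.length_map, List.length_range]
      exact hlen
    · intro i hi1 hi2
      simp only [List.getElem_map, List.getElem_range]
      have hin : i < pvMaxLenA (r0 :: rest) := by
        rw [List.length_map, hlen] at hi1
        exact hi1
      have hgd := pvAFold_getD (pvMaxLenA (r0 :: rest)) (r0 :: rest)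
        (List.replicate (pvMaxLenA (r0 :: rest)) []) i (by simp)
      rw [List.getD_replicate _ hin, List.nil_append] at hgd
      rw [← List.getD_eq_getElem _ [] (by rw [hlen]; exact hin), hgd,
        pvCol_eq (r0 :: rest) (pvMaxLenA (r0 :: rest)) i (pvMaxLen_spec _)]
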